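-- pv_equiv track=rewrite | github.com/LaurierCS/ReviewSessions | CP104/FinalReview/FinalReviewAnswers.py | longest_alliteration
-- ===== SOURCE A (Python) =====
-- def longest_alliteration(list):
--     """
--     Finds the longest series of consecutive words that start with the same letter.
--     Use: longest = longest_alliteration(list)
--     Parameters:
--         list - list of words (list)
--     Returns:
--         longest - longest series of consecutive words that start with the same letter (str)
--     """
--     longest = ""
--     current_longest = ""
--     last_letter = ""
--     for i in range(len(list)):
--         if list[i][0] == last_letter:
--             current_longest += " " + list[i]
--         elif last_letter == "":
--             current_longest = list[i]
--             last_letter = list[i][0]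
--         else:
--             if len(current_longest) > len(longest):
--                 longest = current_longest
--             current_longest = list[i]
--             last_letter = list[i][0]
--
--     if len(current_longest) > len(longest):
--         longest = current_longest
--     return longest
-- ===== SOURCE B (Python) =====
-- def longest_alliteration(list):
--     """Group-then-maximize: split the list into maximal consecutive runs of
--     words sharing a first letter, then return the longest run joined by spaces
--     (strict '>' keeps the earliest run on ties)."""
--     best = ""
--     for run in _runs(list):
--         s = " ".join(run)
--         if len(s) > len(best):
--             best = s
--     return best
--
-- def _runs(words):
--     # maximal consecutive runs of same first letter
--     runs = []
--     i = 0
--     while i < len(words):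
--         j = i + 1
--         while j < len(words) and words[j][0] == words[i][0]:
--             j += 1
--         runs.append(words[i:j])
--         i = j
--     return runs
-- ===== Notes on version B (the rewrite author's own statement) =====
-- stated objective: alternative
-- what changed: Replaces A's single-pass three-variable state machine (longest/current_longest/last_letter with boundary bookkeeping) by a group-then-maximize decomposition: first split the list into maximal consecutive runs of equal first letter, then fold over the runs keeping the longest space-joined one.
-- outside the precondition, e.g. on longest_alliteration(['ape', '', 'axe']): A raises IndexError, B raises IndexError
import Mathlib
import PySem

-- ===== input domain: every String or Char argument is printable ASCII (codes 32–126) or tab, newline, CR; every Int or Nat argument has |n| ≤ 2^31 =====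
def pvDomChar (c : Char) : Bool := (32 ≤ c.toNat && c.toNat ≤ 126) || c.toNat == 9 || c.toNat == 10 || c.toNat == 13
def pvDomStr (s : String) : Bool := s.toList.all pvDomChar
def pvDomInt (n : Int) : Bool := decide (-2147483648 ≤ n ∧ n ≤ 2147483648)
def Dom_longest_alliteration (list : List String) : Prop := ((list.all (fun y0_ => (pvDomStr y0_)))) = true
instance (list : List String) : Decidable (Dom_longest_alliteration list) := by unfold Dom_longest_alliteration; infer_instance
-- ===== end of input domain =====

-- B replaces A's one-pass state machine by a group-then-maximize decomposition (same cost, different structure).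

-- shared primitive: Python w[0] (none = IndexError on the empty word, excluded by Pre_)
def laKey (w : String) : Option Char := PySem.Str.pyGet? w 0

-- ===== PORT A =====
-- state = (longest, current_longest, last_letter); last_letter "" is modelled as none
def laStep (st : List Char × List Char × Option Char) (w : String) : List Char × List Char × Option Char :=
  let c := laKey w
  if c == st.2.2 then (st.1, st.2.1 ++ ' ' :: w.toList, st.2.2)
  else if st.2.2 == none then (st.1, w.toList, c)
  else ((if st.2.1.length > st.1.length then st.2.1 else st.1), w.toList, c)

def longest_alliteration (list : List String) : String :=
  let st := list.foldl laStep ([], [], none)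
  String.ofList (if st.2.1.length > st.1.length then st.2.1 else st.1)

-- ===== PORT B =====
-- the outer while loop of Source B's _runs: each iteration peels one maximal run off the front
def laRuns (words : List String) : List (List String) :=
  match words with
  | [] => []
  | w :: ws =>
    (w :: ws.takeWhile (fun x => laKey x == laKey w)) ::
      laRuns (ws.dropWhile (fun x => laKey x == laKey w))
termination_by words.length
decreasing_by
  simp only [List.length_cons]
  exact Nat.lt_succ_of_le (List.length_dropWhile_le _ _)

def longest_alliteration_alt (list : List String) : String :=
  String.ofList ((laRuns list).foldl (fun best r =>
    let s := PySem.Chars.join [' '] (r.map String.toList)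
    if s.length > best.length then s else best) [])

-- ===== PRECONDITION & SPEC =====
-- Pre_ excludes only lists containing an empty word, on which A raises IndexError at list[i][0] (B raises too).
def Pre_longest_alliteration (list : List String) : Prop := ∀ w ∈ list, w ≠ ""
instance (list : List String) : Decidable (Pre_longest_alliteration list) := by unfold Pre_longest_alliteration; infer_instance
def pvWitness_longest_alliteration : List String := ["apple", "ant", "bee", "bay", "cat"]

def Spec_longest_alliteration (list : List String) (out : String) : Prop := out = longest_alliteration_alt list
instance (list : List String) (out : String) : Decidable (Spec_longest_alliteration list out) := by unfold Spec_longest_alliteration; infer_instance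

-- ===== CLAIM (what is proved, stated in full; the proofs are below) =====
def Claim_equal_longest_alliteration : Prop := ∀ (list : List String), Dom_longest_alliteration list → Pre_longest_alliteration list → Spec_longest_alliteration list (longest_alliteration list)

-- ===== LEMMAS AND PROOFS =====

-- keep-the-longer update, and B's fold expressed with it
def laUpd (b s : List Char) : List Char := if s.length > b.length then s else b
def laBest (rs : List (List String)) (b : List Char) : List Char :=
  rs.foldl (fun b r => laUpd b (PySem.Chars.join [' '] (r.map String.toList))) b
-- A's in-run accumulation step
def laG (a : List Char) (w : String) : List Char := a ++ ' ' :: w.toList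

lemma alt_eq (list : List String) :
    longest_alliteration_alt list = String.ofList (laBest (laRuns list) []) := rfl

lemma laKey_some (w : String) (h : w ≠ "") : ∃ c, laKey w = some c := by
  have hl : w.toList ≠ [] := fun hnil => h (by
    cases w; simp_all)
  cases hw : w.toList with
  | nil => exact absurd hw hl
  | cons a l => exact ⟨a, by simp [laKey, hw]⟩

-- folding laG from an extended accumulator
lemma foldl_laG_append (t : List String) (a b : List Char) :
    t.foldl laG (a ++ b) = a ++ t.foldl laG b := by
  induction t generalizing b with
  | nil => rfl
  | cons x t ih =>
    simp only [List.foldl_cons, laG, List.append_assoc]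
    exact ih (b ++ ' ' :: x.toList)

-- " ".join of a nonempty run = A's accumulation
lemma la_join (w : String) (t : List String) :
    PySem.Chars.join [' '] ((w :: t).map String.toList) = t.foldl laG w.toList := by
  induction t generalizing w with
  | nil => simp [PySem.Chars.join_singleton]
  | cons x t ih =>
    simp only [List.map_cons, PySem.Chars.join_cons_cons, List.foldl_cons]
    rw [show (x.toList :: List.map String.toList t) = List.map String.toList (x :: t) from rfl, ih x]
    rw [show laG w.toList x = (w.toList ++ [' ']) ++ x.toList by simp [laG],
        foldl_laG_append]

-- within a run all keys equal c, so A stays in its first branch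
lemma la_ext (t : List String) (c : Char) (L cur : List Char)
    (h : ∀ x ∈ t, laKey x = some c) :
    t.foldl laStep (L, cur, some c) = (L, t.foldl laG cur, some c) := by
  induction t generalizing cur with
  | nil => rfl
  | cons x t ih =>
    have hx : laKey x = some c := h x (List.mem_cons_self ..)
    simp only [List.foldl_cons, laStep, hx, laG]
    simp only [beq_self_eq_true, if_true]
    exact ih (cur ++ ' ' :: x.toList) (fun y hy => h y (List.mem_cons_of_mem _ hy))

lemma dropWhile_head_false {α : Type} (p : α → Bool) :
    ∀ (l : List α) (w : α) (ws : List α), l.dropWhile p = w :: ws → p w = false := by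
  intro l
  induction l with
  | nil => intro w ws h; simp [List.dropWhile] at h
  | cons a l ih =>
    intro w ws h
    by_cases hp : p a
    · exact ih w ws (by simpa [List.dropWhile, hp] using h)
    · simp [List.dropWhile, hp] at h
      simpa [h.1] using hp

-- main invariant: A's remaining fold = B's best-of-runs fold, relative to the current run
lemma la_main : ∀ (n : Nat) (ws : List String), ws.length ≤ n →
    ∀ (L cur : List Char) (c : Char), (∀ w ∈ ws, w ≠ "") →
    laUpd (ws.foldl laStep (L, cur, some c)).1 (ws.foldl laStep (L, cur, some c)).2.1
    = laBest (laRuns (ws.dropWhile (fun x => laKey x == some c)))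
        (laUpd L ((ws.takeWhile (fun x => laKey x == some c)).foldl laG cur)) := by
  intro n
  induction n with
  | zero =>
    intro ws hlen L cur c hne
    have hws : ws = [] := List.length_eq_zero_iff.mp (Nat.le_zero.mp hlen)
    subst hws
    simp [laRuns, laBest]
  | succ n ih =>
    intro ws hlen L cur c hne
    have hsplit : ws = ws.takeWhile (fun x => laKey x == some c) ++
        ws.dropWhile (fun x => laKey x == some c) :=
      (List.takeWhile_append_dropWhile ..).symm
    have hkeys : ∀ x ∈ ws.takeWhile (fun x => laKey x == some c), laKey x = some c := by
      intro x hx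
      have := List.mem_takeWhile_imp hx
      simpa [beq_iff_eq] using this
    have hext := la_ext (ws.takeWhile (fun x => laKey x == some c)) c L cur hkeys
    conv_lhs => rw [hsplit]
    rw [List.foldl_append, hext]
    cases hr : ws.dropWhile (fun x => laKey x == some c) with
    | nil => simp [laRuns, laBest]
    | cons w ws' =>
      have hw : (laKey w == some c) = false :=
        dropWhile_head_false _ ws w ws' hr
      have hsub : ∀ x ∈ w :: ws', x ∈ ws := by
        intro x hx
        exact (List.dropWhile_suffix (l := ws) (fun x => laKey x == some c)).subset
          (hr ▸ hx)
      have hwne : w ≠ "" := hne w (hsub w (List.mem_cons_self ..))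
      obtain ⟨c', hc'⟩ := laKey_some w hwne
      have hne' : ∀ x ∈ ws', x ≠ "" := fun x hx => hne x (hsub x (List.mem_cons_of_mem _ hx))
      have hlen' : ws'.length ≤ n := by
        have h1 : ws.length ≤ n + 1 := hlen
        have h2 := congrArg List.length hsplit
        rw [hr] at h2
        simp only [List.length_append, List.length_cons] at h2
        omega
      have hstep : laStep (L, (ws.takeWhile (fun x => laKey x == some c)).foldl laG cur, some c) w
          = (laUpd L ((ws.takeWhile (fun x => laKey x == some c)).foldl laG cur), w.toList, some c') := by
        simp only [laStep, hw]
        simp [laUpd, hc']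
      rw [List.foldl_cons, hstep,
        ih ws' hlen' _ w.toList c' hne']
      conv_rhs => rw [laRuns]
      simp only [laBest, List.foldl_cons, hc']
      rw [la_join]

-- ===== VERDICT (by name: the statement is the Claim_ definition above) =====
theorem longest_alliteration_spec : Claim_equal_longest_alliteration := by
  unfold Claim_equal_longest_alliteration
  intro list hdom hpre
  unfold Spec_longest_alliteration
  cases list with
  | nil =>
    show String.ofList _ = _
    rw [alt_eq]
    simp [laBest, laRuns]
  | cons w ws =>
    have hwne : w ≠ "" := hpre w (List.mem_cons_self ..)
    obtain ⟨c0, hc0⟩ := laKey_some w hwne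
    have hne' : ∀ x ∈ ws, x ≠ "" := fun x hx => hpre x (List.mem_cons_of_mem _ hx)
    have hstep0 : laStep ([], [], none) w = ([], w.toList, some c0) := by
      simp [laStep, hc0]
    show String.ofList _ = _
    rw [alt_eq]
    simp only [List.foldl_cons, hstep0]
    have hmain := la_main ws.length ws le_rfl [] w.toList c0 hne'
    conv_rhs => rw [laRuns]
    simp only [laBest, List.foldl_cons, hc0]
    rw [la_join] at *
    congr 1
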